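-- pv_equiv track=rewrite | github.com/kgpro/ai_bot | insta_bot_chat.py | fetch_new_text_from_two_files
-- ===== SOURCE A (Python) =====
-- def fetch_new_text_from_two_files(new_text, previous_text):# call the function in new text arguement new_tex[chat_histry()]
--     list_of_new_text=[]
--     if previous_text == []:
--         list_of_new_text = new_text
--     else:
--         for i in range(1,len(new_text)):
--             if new_text[-i]!=previous_text[-1]:
--                 list_of_new_text.append(new_text[-i])
--             else:
--                 break
--     return list_of_new_text
-- ===== SOURCE B (Python) =====
-- def fetch_new_text_from_two_files(new_text, previous_text):
--     if previous_text == []: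
--         return new_text
--     rev = new_text[1:][::-1]
--     target = previous_text[-1]
--     if target in rev:
--         return rev[:rev.index(target)]
--     return rev
-- ===== Notes on version B (the rewrite author's own statement) =====
-- stated objective: simpler
-- what changed: Replaces the incremental negative-index append/break loop with a 'reverse the tail, locate the boundary with index(), slice' decomposition.
import Mathlib
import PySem

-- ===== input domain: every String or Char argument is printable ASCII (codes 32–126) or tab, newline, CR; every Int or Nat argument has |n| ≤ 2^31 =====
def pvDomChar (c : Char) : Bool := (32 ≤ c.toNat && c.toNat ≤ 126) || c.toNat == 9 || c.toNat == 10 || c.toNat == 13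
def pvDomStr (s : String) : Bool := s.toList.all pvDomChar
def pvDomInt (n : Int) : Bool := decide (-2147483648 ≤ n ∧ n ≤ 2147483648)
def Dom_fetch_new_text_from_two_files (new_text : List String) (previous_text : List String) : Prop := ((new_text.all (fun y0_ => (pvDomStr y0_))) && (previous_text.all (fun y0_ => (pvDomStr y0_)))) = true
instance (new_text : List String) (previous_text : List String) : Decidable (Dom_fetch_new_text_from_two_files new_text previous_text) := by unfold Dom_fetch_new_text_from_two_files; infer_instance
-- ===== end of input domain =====

-- B replaces A's negative-index append/break loop by 'reverse the tail, find the boundary with index, slice' (simpler decomposition; same cost).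

-- ===== PORT A =====
-- the for-loop over range(1, len(new_text)) with append/break, as structural recursion over the range list
def fetchLoopA (new_text : List String) (last : String) : List Int → List String → List String
  | [], acc => acc
  | i :: is, acc =>
    if PySem.List.pyGetD new_text (-i) "" ≠ last then
      fetchLoopA new_text last is (acc ++ [PySem.List.pyGetD new_text (-i) ""])
    else acc

def fetch_new_text_from_two_files (new_text : List String) (previous_text : List String) : List String :=
  if previous_text = [] then new_text
  else fetchLoopA new_text (PySem.List.pyGetD previous_text (-1) "")
        (PySem.List.pyRange 1 (new_text.length : Int) 1) []

-- ===== PORT B =====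
def fetch_new_text_from_two_files_alt (new_text : List String) (previous_text : List String) : List String :=
  if previous_text = [] then new_text
  else
    let rev := (PySem.List.slice new_text (some 1) none).reverse   -- new_text[1:][::-1]
    let target := PySem.List.pyGetD previous_text (-1) ""
    if rev.contains target then
      PySem.List.slice rev none (some (((PySem.List.index? rev target).getD 0 : Nat) : Int))
    else rev

-- ===== PRECONDITION & SPEC =====
def Spec_fetch_new_text_from_two_files (new_text : List String) (previous_text : List String) (out : List String) : Prop := out = fetch_new_text_from_two_files_alt new_text previous_text
instance (new_text : List String) (previous_text : List String) (out : List String) : Decidable (Spec_fetch_new_text_from_two_files new_text previous_text out) := by unfold Spec_fetch_new_text_from_two_files; infer_instance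

-- ===== CLAIM (what is proved, stated in full; the proofs are below) =====
def Claim_equal_fetch_new_text_from_two_files : Prop := ∀ (new_text : List String) (previous_text : List String), Dom_fetch_new_text_from_two_files new_text previous_text → Spec_fetch_new_text_from_two_files new_text previous_text (fetch_new_text_from_two_files new_text previous_text)

-- ===== LEMMAS AND PROOFS =====

-- A's loop is takeWhile over the values it reads
theorem fetchLoopA_eq (xs : List String) (last : String) :
    ∀ (r : List Int) (acc : List String),
      fetchLoopA xs last r acc
        = acc ++ ((r.map (fun i => PySem.List.pyGetD xs (-i) "")).takeWhile (fun x => x ≠ last)) := by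
  intro r
  induction r with
  | nil => intro acc; simp [fetchLoopA]
  | cons i is ih =>
    intro acc
    by_cases h : PySem.List.pyGetD xs (-i) "" = last
    · simp [fetchLoopA, h]
    · simp [fetchLoopA, h, ih]

-- the values A reads are exactly the reversed tail of new_text
theorem map_neg_pyGetD (xs : List String) :
    (PySem.List.pyRange 1 (xs.length : Int) 1).map (fun i => PySem.List.pyGetD xs (-i) "")
      = xs.tail.reverse := by
  apply List.ext_getElem
  · simp [PySem.List.length_pyRange_one]
  · intro k h1 h2
    have hk : k < xs.length - 1 := by
      simpa [PySem.List.length_pyRange_one] using h1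
    have hlen : 1 ≤ xs.length := by omega
    simp only [List.getElem_map, PySem.List.getElem_pyRange_one]
    have hi : (1 : Int) + (k : Int) = ((k + 1 : Nat) : Int) := by push_cast; ring
    rw [hi, PySem.List.pyGetD_neg_natCast xs (k+1) "" (by omega) (by omega)]
    rw [List.getElem_reverse, List.getElem_tail]
    congr 1
    simp
    omega

-- B's lookup-and-slice is takeWhile
theorem index_slice_eq_takeWhile (l : List String) (t : String) :
    (if l.contains t then
        PySem.List.slice l none (some (((PySem.List.index? l t).getD 0 : Nat) : Int))
      else l)
      = l.takeWhile (fun x => x ≠ t) := by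
  induction l with
  | nil => simp
  | cons x l ih =>
    by_cases h : x = t
    · subst h
      rw [if_pos (by simp), PySem.List.index?_cons_self x l, PySem.List.slice_to_natCast]
      simp [List.takeWhile]
    · have hidx : PySem.List.index? (x :: l) t = (PySem.List.index? l t).map (· + 1) :=
        PySem.List.index?_cons_of_ne l h
      by_cases hc : l.contains t
      · have hmem : t ∈ l := by simpa using hc
        obtain ⟨k, hk⟩ : ∃ k, PySem.List.index? l t = some k := by
          have := (PySem.List.index?_isSome_iff (xs := l) (v := t)).2 hmem
          exact Option.isSome_iff_exists.1 this
        have hcontains : (x :: l).contains t = true := by simp [hmem]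
        rw [if_pos hcontains, hidx, hk]
        have ihc := ih
        rw [if_pos (by simpa using hmem), hk] at ihc
        simp only [Option.getD_some] at ihc ⊢
        rw [PySem.List.slice_to_natCast] at ihc ⊢
        simp [List.takeWhile, h, List.take_succ_cons, ihc]
      · have hmem : t ∉ l := by simpa using hc
        have hts : ¬t = x := fun he => h he.symm
        have ihc := ih
        rw [if_neg (by simp [hmem])] at ihc
        rw [if_neg (by simp [hts, hmem])]
        simp [List.takeWhile_cons, h]
        simpa using ihc

-- ===== VERDICT (by name: the statement is the Claim_ definition above) =====
theorem fetch_new_text_from_two_files_spec : Claim_equal_fetch_new_text_from_two_files := by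
  intro new_text previous_text _
  unfold Spec_fetch_new_text_from_two_files fetch_new_text_from_two_files fetch_new_text_from_two_files_alt
  by_cases hp : previous_text = []
  · rw [if_pos hp, if_pos hp]
  · rw [if_neg hp, if_neg hp, fetchLoopA_eq, map_neg_pyGetD, PySem.List.slice_from_one]
    simp only [index_slice_eq_takeWhile, List.nil_append]
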